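-- pv_equiv track=rewrite | github.com/Jo-Chang/BaekjoonHub | 백준/Bronze/1547. 공/공.py | find_ball
-- ===== SOURCE A (Python) =====
-- def find_ball(lst_):
--     ball = 1
--     for a, b in lst_:
--         if a == ball:
--             ball = b
--             continue
--         elif b == ball:
--             ball = a
--
--     if ball not in [1, 2, 3]:
--         return -1
--
--     return ball
-- ===== SOURCE B (Python) =====
-- def find_ball(lst_):
--     board = {1: True}
--     for a, b in lst_:
--         va = board.get(a, False)
--         vb = board.get(b, False)
--         board[a] = vb
--         board[b] = va
--     pos = next((k for k, v in board.items() if v), -1)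
--     if pos not in [1, 2, 3]:
--         return -1
--     return pos
-- ===== Notes on version B (the rewrite author's own statement) =====
-- stated objective: alternative
-- what changed: B simulates the whole board as a dict position->has-ball, swapping the two entries of every swap unconditionally, and finds the ball's key at the end, instead of A's branch-per-swap tracking of a single scalar position.
import Mathlib
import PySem

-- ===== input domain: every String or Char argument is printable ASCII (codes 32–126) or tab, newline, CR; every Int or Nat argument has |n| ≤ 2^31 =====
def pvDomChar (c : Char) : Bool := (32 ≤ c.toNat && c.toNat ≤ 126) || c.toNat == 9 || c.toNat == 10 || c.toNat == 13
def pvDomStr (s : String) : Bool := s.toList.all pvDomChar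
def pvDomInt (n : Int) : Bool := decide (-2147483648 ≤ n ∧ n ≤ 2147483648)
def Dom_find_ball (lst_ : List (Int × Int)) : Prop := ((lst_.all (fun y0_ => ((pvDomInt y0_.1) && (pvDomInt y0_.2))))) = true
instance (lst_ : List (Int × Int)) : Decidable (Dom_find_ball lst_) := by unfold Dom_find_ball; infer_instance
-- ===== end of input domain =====

-- B replaces A's single-scalar ball tracking by whole-board simulation in a dict (position -> has-ball),
-- swapping the two entries of every swap unconditionally and locating the ball's key at the end (objective: alternative).

-- ===== PORT A =====
-- one iteration of A's loop: if a == ball: ball = b; elif b == ball: ball = a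
def fbStepA (ball : Int) (ab : Int × Int) : Int :=
  if ab.1 = ball then ab.2 else if ab.2 = ball then ab.1 else ball

def find_ball (lst_ : List (Int × Int)) : Int :=
  let ball := lst_.foldl fbStepA 1
  if ball ∈ ([1, 2, 3] : List Int) then ball else -1

-- ===== PORT B =====
-- one iteration of B's loop: read both positions (default False), then write them back swapped
def fbStepB (d : PySem.Dict Int Bool) (ab : Int × Int) : PySem.Dict Int Bool :=
  let va := d.getD ab.1 false
  let vb := d.getD ab.2 false
  (d.insert ab.1 vb).insert ab.2 va

def find_ball_alt (lst_ : List (Int × Int)) : Int :=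
  let board := lst_.foldl fbStepB ((PySem.Dict.empty).insert 1 true)
  let pos := ((board.items.find? (fun p => p.2)).map Prod.fst).getD (-1)
  if pos ∈ ([1, 2, 3] : List Int) then pos else -1

-- ===== PRECONDITION & SPEC =====
def Spec_find_ball (lst_ : List (Int × Int)) (out : Int) : Prop := out = find_ball_alt lst_
instance (lst_ : List (Int × Int)) (out : Int) : Decidable (Spec_find_ball lst_ out) := by unfold Spec_find_ball; infer_instance

-- ===== CLAIM (what is proved, stated in full; the proofs are below) =====
def Claim_equal_find_ball : Prop := ∀ (lst_ : List (Int × Int)), Dom_find_ball lst_ → Spec_find_ball lst_ (find_ball lst_)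

-- ===== LEMMAS AND PROOFS =====

-- invariant: keys are unique and the board holds `true` exactly at A's current ball position
def fbInv (d : PySem.Dict Int Bool) (ball : Int) : Prop :=
  d.keys.Nodup ∧ ∀ k : Int, d.getD k false = decide (k = ball)

lemma fbInv_init : fbInv ((PySem.Dict.empty).insert 1 true) 1 := by
  refine ⟨PySem.Dict.nodup_keys_insert _ _ _ PySem.Dict.nodup_keys_empty, fun k => ?_⟩
  rw [PySem.Dict.getD_insert]
  split_ifs with h <;> simp [h, PySem.Dict.getD_empty]

lemma fbInv_step (d : PySem.Dict Int Bool) (ball : Int) (ab : Int × Int)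
    (h : fbInv d ball) : fbInv (fbStepB d ab) (fbStepA ball ab) := by
  obtain ⟨hnd, hget⟩ := h
  refine ⟨PySem.Dict.nodup_keys_insert _ _ _ (PySem.Dict.nodup_keys_insert _ _ _ hnd), fun k => ?_⟩
  simp only [fbStepB, fbStepA, PySem.Dict.getD_insert, hget]
  split_ifs <;> simp_all <;> omega

lemma fbInv_fold (l : List (Int × Int)) (d : PySem.Dict Int Bool) (ball : Int)
    (h : fbInv d ball) : fbInv (l.foldl fbStepB d) (l.foldl fbStepA ball) := by
  induction l generalizing d ball with
  | nil => exact h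
  | cons ab t ih => exact ih _ _ (fbInv_step d ball ab h)

lemma fbInv_find (d : PySem.Dict Int Bool) (ball : Int) (h : fbInv d ball) :
    ((d.items.find? (fun p => p.2)).map Prod.fst).getD (-1) = ball := by
  obtain ⟨hnd, hget⟩ := h
  have hball : d.getD ball false = true := by simp [hget]
  have hcont : d.contains ball = true := by
    by_contra hc
    rw [PySem.Dict.getD_of_not_contains _ _ (by simpa using hc)] at hball
    exact Bool.false_ne_true hball
  obtain ⟨v, hv⟩ : ∃ v, d.get? ball = some v := by
    rcases hv : d.get? ball with _ | v
    · rw [PySem.Dict.contains_eq_isSome_get?, hv] at hcont; simp at hcont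
    · exact ⟨v, rfl⟩
  have hvt : v = true := by
    have := PySem.Dict.getD_eq_get?_getD d ball false
    rw [hv] at this; simpa [this] using hball
  subst hvt
  have hmem : (ball, true) ∈ d.items := PySem.Dict.mem_items_of_get?_eq_some _ hv
  rcases hfind : d.items.find? (fun p => p.2) with _ | p
  · exact absurd (List.find?_eq_none.mp hfind _ hmem rfl) (by simp)
  · rw [hfind]
    simp only [Option.map_some, Option.getD_some]
    have hp2 : p.2 = true := by simpa using List.find?_some hfind
    have hpm : p ∈ d.items := List.mem_of_find?_eq_some hfind
    have hpd : d.getD p.1 false = p.2 :=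
      PySem.Dict.getD_of_mem_items d (k := p.1) (v := p.2) (by simpa using hpm) hnd false
    rw [hget, hp2] at hpd
    simpa using of_decide_eq_true hpd

-- ===== VERDICT (by name: the statement is the Claim_ definition above) =====
theorem find_ball_spec : Claim_equal_find_ball := by
  intro lst_ _
  unfold Spec_find_ball find_ball find_ball_alt
  simp only []
  rw [fbInv_find _ _ (fbInv_fold lst_ _ 1 fbInv_init)]
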